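-- pv_equiv track=rewrite | github.com/sujal9305/Website_data_extraction | app/scraper.py | prioritize_links
-- ===== SOURCE A (Python) =====
-- def prioritize_links(links):
--     priority_keywords = [
--         "about", "service", "solution", "product",
--         "company", "team", "contact", "work", "case"
--     ]
--
--     def score(link):
--         return sum(1 for k in priority_keywords if k in link.lower())
--
--     return sorted(links, key=score, reverse=True)
-- ===== SOURCE B (Python) =====
-- def prioritize_links(links):
--     priority_keywords = [
--         "about", "service", "solution", "product",
--         "company", "team", "contact", "work", "case"
--     ]
--
--     def score(link):
--         low = link.lower()
--         return sum(k in low for k in priority_keywords)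
--
--     buckets = {}
--     for link in links:
--         buckets.setdefault(score(link), []).append(link)
--     result = []
--     for v in range(9, -1, -1):
--         result.extend(buckets.get(v, []))
--     return result
-- ===== Notes on version B (the rewrite author's own statement) =====
-- stated objective: alternative
-- what changed: Replaces the comparison sort (sorted with key, reverse=True) by a single-pass bucket grouping keyed on the bounded score 0..9, emitting buckets from score 9 down to 0, preserving input order within each bucket.
import Mathlib
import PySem

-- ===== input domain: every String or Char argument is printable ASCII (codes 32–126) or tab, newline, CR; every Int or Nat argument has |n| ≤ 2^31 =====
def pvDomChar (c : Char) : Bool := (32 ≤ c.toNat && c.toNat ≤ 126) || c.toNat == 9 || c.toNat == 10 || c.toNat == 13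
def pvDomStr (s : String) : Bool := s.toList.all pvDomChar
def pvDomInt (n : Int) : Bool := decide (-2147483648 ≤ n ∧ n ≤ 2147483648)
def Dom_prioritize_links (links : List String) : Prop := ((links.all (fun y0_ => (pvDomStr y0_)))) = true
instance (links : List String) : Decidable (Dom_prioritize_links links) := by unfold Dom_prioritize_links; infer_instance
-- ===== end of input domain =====

-- B replaces the comparison sort by a one-pass bucket grouping on the bounded score (0..9), emitted from score 9 down to 0 (alternative linear-pass decomposition; same observable result).


-- ===== PORT A =====
def pvKeywords : List String :=
  ["about", "service", "solution", "product", "company", "team", "contact", "work", "case"]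

-- sum(1 for k in priority_keywords if k in link.lower())
def pvScoreA (link : String) : Int :=
  pvKeywords.foldl (fun acc k => if PySem.Str.isIn k (PySem.Str.lower link) then acc + 1 else acc) 0

def prioritize_links (links : List String) : List String :=
  PySem.List.sorted links pvScoreA true

-- ===== PORT B =====
-- low = link.lower(); sum(k in low for k in priority_keywords)
def pvScoreB (link : String) : Int :=
  let low := PySem.Str.lower link
  pvKeywords.foldl (fun acc k => acc + (if PySem.Str.isIn k low then 1 else 0)) 0

def prioritize_links_alt (links : List String) : List String :=
  let buckets :=
    links.foldl (fun d link => d.modify (pvScoreB link) [] (fun b => b ++ [link])) PySem.Dict.empty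
  (PySem.List.pyRange 9 (-1) (-1)).foldl (fun res v => res ++ buckets.getD v []) []

-- ===== PRECONDITION & SPEC =====
def Spec_prioritize_links (links : List String) (out : List String) : Prop := out = prioritize_links_alt links
instance (links : List String) (out : List String) : Decidable (Spec_prioritize_links links out) := by unfold Spec_prioritize_links; infer_instance

-- ===== CLAIM (what is proved, stated in full; the proofs are below) =====
def Claim_equal_prioritize_links : Prop := ∀ (links : List String), Dom_prioritize_links links → Spec_prioritize_links links (prioritize_links links)

-- ===== LEMMAS AND PROOFS =====

-- the two score helpers compute the same value
theorem foldl_add_ite_eq (p : String → Bool) :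
    ∀ (l : List String) (a : Int),
      l.foldl (fun acc k => acc + (if p k then 1 else 0)) a
        = l.foldl (fun acc k => if p k then acc + 1 else acc) a := by
  intro l
  induction l with
  | nil => intro a; rfl
  | cons x xs ih =>
      intro a
      simp only [List.foldl_cons]
      by_cases h : p x <;> simp [h, ih]

theorem scoreB_eq_scoreA (link : String) : pvScoreB link = pvScoreA link := by
  unfold pvScoreB pvScoreA
  exact foldl_add_ite_eq _ _ 0

theorem scoreA_bounds (link : String) : 0 ≤ pvScoreA link ∧ pvScoreA link ≤ 9 := by
  unfold pvScoreA
  rw [PySem.List.foldl_if_add_one]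
  have h := List.countP_le_length
    (p := fun k => PySem.Str.isIn k (PySem.Str.lower link)) (l := pvKeywords)
  have hl : pvKeywords.length = 9 := rfl
  omega

-- insertBy passes over a block it does not go before
theorem insertBy_skip {α : Type} (before : α → α → Bool) (x : α) :
    ∀ (L M : List α), (∀ y ∈ L, before x y = false) →
      PySem.List.insertBy before x (L ++ M) = L ++ PySem.List.insertBy before x M := by
  intro L
  induction L with
  | nil => intro M _; rfl
  | cons a L ih =>
      intro M h
      have ha : before x a = false := h a (by simp)
      simp only [List.cons_append, PySem.List.insertBy, ha]
      simp only [Bool.false_eq_true, if_false]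
      rw [ih M (fun y hy => h y (by simp [hy]))]

-- insertBy goes in front of a list it goes before everywhere
theorem insertBy_front {α : Type} (before : α → α → Bool) (x : α) :
    ∀ (M : List α), (∀ y ∈ M, before x y = true) →
      PySem.List.insertBy before x M = x :: M := by
  intro M h
  cases M with
  | nil => rfl
  | cons a M =>
      have ha : before x a = true := h a (by simp)
      simp [PySem.List.insertBy, ha]

-- the descending-bucket decomposition absorbs one more element
theorem insert_flatMap_filter (x : String) (xs : List String) :
    ∀ (V : List Int), pvScoreA x ∈ V → V.Pairwise (fun a b => b < a) →
      PySem.List.insertBy (fun a b => decide (pvScoreA b < pvScoreA a)) x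
          (V.flatMap (fun v => xs.filter (fun l => pvScoreA l == v)))
        = V.flatMap (fun v => (xs ++ [x]).filter (fun l => pvScoreA l == v)) := by
  intro V
  induction V with
  | nil => intro h; simp at h
  | cons v V ih =>
      intro hmem hpw
      rcases List.pairwise_cons.mp hpw with ⟨hvlt, hpw'⟩
      by_cases hs : pvScoreA x = v
      · -- insert at the end of bucket v
        have hfx : (xs ++ [x]).filter (fun l => pvScoreA l == v)
            = xs.filter (fun l => pvScoreA l == v) ++ [x] := by
          simp [List.filter_append, hs]
        have hrest : ∀ w ∈ V, (xs ++ [x]).filter (fun l => pvScoreA l == w)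
            = xs.filter (fun l => pvScoreA l == w) := by
          intro w hw
          have : pvScoreA x ≠ w := by
            have := hvlt w hw; omega
          simp [List.filter_append, this]
        rw [List.flatMap_cons, insertBy_skip]
        · rw [insertBy_front]
          · rw [List.flatMap_cons, hfx]
            simp only [List.append_assoc, List.singleton_append]
            congr 1
            congr 1
            exact (List.flatMap_congr (fun w hw => (hrest w hw).symm))
          · intro y hy
            rcases List.mem_flatMap.mp hy with ⟨w, hw, hyw⟩
            have hyv : pvScoreA y = w := by
              have := List.of_mem_filter hyw; simpa using this
            have : w < v := hvlt w hw
            simp only [decide_eq_true_iff]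
            omega
        · intro y hy
          have hyv : pvScoreA y = v := by
            have := List.of_mem_filter hy; simpa using this
          simp [hyv, hs]
      · -- skip bucket v, recurse
        have hmem' : pvScoreA x ∈ V := by
          rcases List.mem_cons.mp hmem with h | h
          · exact absurd h hs
          · exact h
        have hvgt : pvScoreA x < v := hvlt _ hmem'
        have hfv : (xs ++ [x]).filter (fun l => pvScoreA l == v)
            = xs.filter (fun l => pvScoreA l == v) := by
          have : pvScoreA x ≠ v := hs
          simp [List.filter_append, this]
        rw [List.flatMap_cons, List.flatMap_cons, insertBy_skip, hfv,
          ih hmem' hpw']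
        intro y hy
        have hyv : pvScoreA y = v := by
          have := List.of_mem_filter hy; simpa using this
        simp only [decide_eq_false_iff_not]
        omega

-- A's stable reverse sort is the descending bucket concatenation
theorem sortedA_eq_buckets (links : List String) :
    prioritize_links links
      = ([9, 8, 7, 6, 5, 4, 3, 2, 1, 0] : List Int).flatMap
          (fun v => links.filter (fun l => pvScoreA l == v)) := by
  unfold prioritize_links
  rw [PySem.List.sorted_rev_eq_foldl_insertBy]
  induction links using List.reverseRecOn with
  | nil => rfl
  | append_singleton xs x ih =>
      rw [List.foldl_append, List.foldl_cons, List.foldl_nil, ih]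
      have hb := scoreA_bounds x
      apply insert_flatMap_filter
      · have h0 := hb.1; have h9 := hb.2
        interval_cases h : (pvScoreA x) <;> simp
      · decide

-- B's buckets hold exactly the per-score filters
theorem buckets_getD (links : List String) (v : Int) :
    (links.foldl (fun d link => d.modify (pvScoreB link) [] (fun b => b ++ [link]))
        PySem.Dict.empty).getD v []
      = links.filter (fun l => pvScoreA l == v) := by
  have h1 : links.foldl (fun d link => d.modify (pvScoreB link) [] (fun b => b ++ [link]))
        PySem.Dict.empty
      = (links.map (fun l => (pvScoreB l, l))).foldl
          (fun d p => d.modify p.1 [] (fun b => b ++ [p.2])) PySem.Dict.empty := by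
    rw [List.foldl_map]
  rw [h1, PySem.Dict.getD_foldl_modify_append]
  simp [List.filter_map, List.map_map, Function.comp_def, scoreB_eq_scoreA]

-- ===== VERDICT (by name: the statement is the Claim_ definition above) =====
theorem prioritize_links_spec : Claim_equal_prioritize_links := by
  intro links _
  unfold Spec_prioritize_links
  show prioritize_links links = prioritize_links_alt links
  rw [sortedA_eq_buckets]
  unfold prioritize_links_alt
  simp only [buckets_getD]
  rw [show PySem.List.pyRange 9 (-1) (-1) = [9, 8, 7, 6, 5, 4, 3, 2, 1, 0] from rfl]
  simp
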